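-- pv_equiv track=rewrite | github.com/piplupmaster32/quanfluence | encodings/qubo_helpers.py | decode_vector
-- ===== SOURCE A (Python) =====
-- def decode_binary(binary, coefficients):
--     """Decode binary representation back to integer"""
--     return sum(bit * coeff for bit, coeff in zip(binary, coefficients))
--
-- def decode_vector(binary_vector, n_variables, width, coefficients):
--     """Decode binary vector back to integers"""
--     integer_vector = []
--
--     for i in range(n_variables):
--         start = i * width
--         end = start + width
--         var_binary = binary_vector[start:end]
--         integer_val = decode_binary(var_binary, coefficients)
--         integer_vector.append(integer_val)
--
--     return integer_vector
-- ===== SOURCE B (Python) =====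
-- def decode_vector(binary_vector, n_variables, width, coefficients):
--     n = max(n_variables, 0)
--     result = [0] * n
--     if width <= 0:
--         # zero bits per variable: nothing to accumulate (also avoids idx // 0)
--         return result
--     m = min(width, len(coefficients))
--     for idx, bit in enumerate(binary_vector):
--         var = idx // width
--         if var >= n:
--             break
--         pos = idx - var * width
--         if pos < m:
--             result[var] += bit * coefficients[pos]
--     return result
-- ===== Notes on version B (the rewrite author's own statement) =====
-- stated objective: faster
-- what changed: Replaces per-variable chunk slicing plus zip-reduce with a single enumerate pass over the binary vector that accumulates bit*coefficient into a preallocated result via idx//width, avoiding per-variable slice allocations and generator overhead.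
-- outside the precondition, e.g. on decode_vector([1, 1], 1, -1, [1]): A returns [1], B returns [0]
import Mathlib
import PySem

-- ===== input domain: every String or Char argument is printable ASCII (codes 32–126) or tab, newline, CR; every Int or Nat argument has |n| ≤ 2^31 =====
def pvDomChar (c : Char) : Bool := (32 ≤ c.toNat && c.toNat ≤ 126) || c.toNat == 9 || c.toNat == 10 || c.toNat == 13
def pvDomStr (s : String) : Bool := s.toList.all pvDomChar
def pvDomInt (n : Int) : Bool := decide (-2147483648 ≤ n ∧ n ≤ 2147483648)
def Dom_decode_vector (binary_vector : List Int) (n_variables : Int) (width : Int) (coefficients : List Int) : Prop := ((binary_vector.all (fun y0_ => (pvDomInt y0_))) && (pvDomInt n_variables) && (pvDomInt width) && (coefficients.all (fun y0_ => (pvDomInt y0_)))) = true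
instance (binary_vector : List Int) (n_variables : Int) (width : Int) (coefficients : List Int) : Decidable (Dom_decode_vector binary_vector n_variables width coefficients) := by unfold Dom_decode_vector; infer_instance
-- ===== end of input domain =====

-- B replaces A's per-variable slice-and-zip decode with one enumerate pass over the binary vector
-- accumulating bit*coefficient at index idx//width (no per-chunk slice allocations); Pre_ restricts
-- to the natural domain 0 <= width, where equivalence is proved.


-- ===== PORT A =====
def decode_binary (binary : List Int) (coefficients : List Int) : Int :=
  (binary.zip coefficients).foldl (fun s p => s + p.1 * p.2) 0

def decode_vector (binary_vector : List Int) (n_variables : Int) (width : Int) (coefficients : List Int) : List Int :=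
  (PySem.List.pyRange 0 n_variables 1).foldl
    (fun integer_vector i =>
      let start := i * width
      let stop := start + width
      let var_binary := PySem.List.slice binary_vector (some start) (some stop)
      let integer_val := decode_binary var_binary coefficients
      integer_vector ++ [integer_val]) []

-- ===== PORT B =====
-- loop body of B's `for idx, bit in enumerate(binary_vector)`; `result[var]` and `coefficients[pos]`
-- are ported as List.set / List.getD, exact because the guards keep 0 ≤ var < n = len(result) and 0 ≤ pos < m ≤ len(coefficients)
def altLoop (w m n : Int) (c : List Int) : List Int → Int → List Int → List Int
  | [], _, res => res
  | bit :: rest, idx, res =>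
    let var := PySem.Int.floordiv idx w
    if n ≤ var then res
    else
      let pos := idx - var * w
      let res' := if pos < m then res.set var.toNat ((res.getD var.toNat 0) + bit * (c.getD pos.toNat 0)) else res
      altLoop w m n c rest (idx + 1) res'

def decode_vector_alt (binary_vector : List Int) (n_variables : Int) (width : Int) (coefficients : List Int) : List Int :=
  let n := max n_variables 0
  let result := List.replicate n.toNat 0
  if width ≤ 0 then result
  else
    let m := min width (coefficients.length : Int)
    altLoop width m n coefficients binary_vector 0 result

-- ===== PRECONDITION & SPEC =====
-- Pre_ excludes negative width, a malformed input outside the encoding's natural domain: there A's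
-- negative slice bound binary_vector[0:width] wraps, so variable 0 accidentally decodes all but the
-- last |width| entries of the whole vector, a value no caller would specify; B returns all zeros there.
def Pre_decode_vector (binary_vector : List Int) (n_variables : Int) (width : Int) (coefficients : List Int) : Prop :=
  0 ≤ width
instance (binary_vector : List Int) (n_variables : Int) (width : Int) (coefficients : List Int) : Decidable (Pre_decode_vector binary_vector n_variables width coefficients) := by unfold Pre_decode_vector; infer_instance

def pvWitness_decode_vector : List Int × Int × Int × List Int := ([1, 0, 1, 1], 2, 2, [1, 2])

def Spec_decode_vector (binary_vector : List Int) (n_variables : Int) (width : Int) (coefficients : List Int) (out : List Int) : Prop := out = decode_vector_alt binary_vector n_variables width coefficients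
instance (binary_vector : List Int) (n_variables : Int) (width : Int) (coefficients : List Int) (out : List Int) : Decidable (Spec_decode_vector binary_vector n_variables width coefficients out) := by unfold Spec_decode_vector; infer_instance

-- ===== CLAIM (what is proved, stated in full; the proofs are below) =====
def Claim_equal_decode_vector : Prop := ∀ (binary_vector : List Int) (n_variables : Int) (width : Int) (coefficients : List Int), Dom_decode_vector binary_vector n_variables width coefficients → Pre_decode_vector binary_vector n_variables width coefficients → Spec_decode_vector binary_vector n_variables width coefficients (decode_vector binary_vector n_variables width coefficients)

-- ===== LEMMAS AND PROOFS =====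

theorem db_eq_sum (xs ys : List Int) :
    decode_binary xs ys = ((xs.zip ys).map (fun p => p.1 * p.2)).sum := by
  unfold decode_binary
  rw [PySem.List.foldl_add]
  simp

theorem db_cons (x y : Int) (xs ys : List Int) :
    decode_binary (x :: xs) (y :: ys) = x * y + decode_binary xs ys := by
  simp [db_eq_sum]

theorem db_nil_right (xs : List Int) : decode_binary xs [] = 0 := by
  simp [db_eq_sum]

theorem db_nil_left (ys : List Int) : decode_binary [] ys = 0 := by
  simp [db_eq_sum]

theorem A_map (bv : List Int) (n w : Int) (c : List Int) :
    decode_vector bv n w c =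
      (PySem.List.pyRange 0 n 1).map
        (fun i => decode_binary (PySem.List.slice bv (some (i * w)) (some (i * w + w))) c) := by
  unfold decode_vector
  rw [PySem.List.foldl_append_singleton_eq_map]
  simp

-- Nat-indexed mirror of altLoop, used only in the proofs
def natLoop (W : Nat) (m : Int) (n : Nat) (c : List Int) : List Int → Nat → List Int → List Int
  | [], _, res => res
  | bit :: rest, k, res =>
    if n ≤ k / W then res
    else
      let res' := if ((k % W : Nat) : Int) < m then
          res.set (k / W) (res.getD (k / W) 0 + bit * c.getD (k % W) 0) else res
      natLoop W m n c rest (k + 1) res'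

theorem altLoop_eq_natLoop (W : Nat) (m : Int) (n : Nat) (c : List Int) :
    ∀ (bv : List Int) (k : Nat) (res : List Int),
      altLoop (W : Int) m (n : Int) c bv (k : Int) res = natLoop W m n c bv k res := by
  intro bv
  induction bv with
  | nil => intro k res; rfl
  | cons bit rest ih =>
    intro k res
    have hh : ((k / W : Nat) : Int) * (W : Int) + ((k % W : Nat) : Int) = (k : Int) := by
      rw [mul_comm]
      exact_mod_cast Nat.div_add_mod k W
    have hpos : (k : Int) - ((k / W : Nat) : Int) * (W : Int) = ((k % W : Nat) : Int) := by
      omega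
    simp only [altLoop, natLoop, PySem.Int.floordiv_natCast, hpos, Int.toNat_natCast,
      Nat.cast_le]
    by_cases hg : n ≤ k / W
    · rw [if_pos hg, if_pos hg]
    · rw [if_neg hg, if_neg hg]
      have hc1 : ((k : Int) + 1) = ((k + 1 : Nat) : Int) := by push_cast; ring
      rw [hc1, ih]

theorem natLoop_nle (W : Nat) (m : Int) (c : List Int) (bv : List Int) (k : Nat)
    (res : List Int) : natLoop W m 0 c bv k res = res := by
  cases bv with
  | nil => rfl
  | cons bit rest => simp [natLoop]

theorem natLoop_shift (W : Nat) (hW : 0 < W) (m : Int) (c : List Int) :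
    ∀ (bv : List Int) (k : Nat) (h : Int) (res : List Int) (n : Nat), res.length = n → W ≤ k →
      natLoop W m (n + 1) c bv k (h :: res)
        = h :: natLoop W m n c bv (k - W) res := by
  intro bv
  induction bv with
  | nil => intro k h res n hn hk; rfl
  | cons bit rest ih =>
    intro k h res n hn hk
    have hdiv : k / W = (k - W) / W + 1 := by
      conv_lhs => rw [← Nat.sub_add_cancel hk]
      rw [Nat.add_div_right _ hW]
    have hmod : k % W = (k - W) % W := by
      conv_lhs => rw [← Nat.sub_add_cancel hk]
      rw [Nat.add_mod_right]
    simp only [natLoop, hdiv, hmod, List.set_cons_succ, List.getD_cons_succ]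
    by_cases hg : n ≤ (k - W) / W
    · rw [if_pos (by omega), if_pos hg]
    · rw [if_neg (by omega), if_neg hg]
      by_cases hm : (((k - W) % W : Nat) : Int) < m
      · rw [if_pos hm, if_pos hm]
        rw [ih (k + 1) h
          (res.set ((k - W) / W) (res.getD ((k - W) / W) 0 + bit * c.getD ((k - W) % W) 0))
          n (by simp [hn]) (by omega), show k + 1 - W = (k - W) + 1 by omega]
      · rw [if_neg hm, if_neg hm]
        rw [ih (k + 1) h res n hn (by omega), show k + 1 - W = (k - W) + 1 by omega]

theorem natLoop_head (W : Nat) (hW : 0 < W) (c : List Int) :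
    ∀ (bv : List Int) (j : Nat) (h : Int) (res : List Int) (n : Nat), res.length = n → j < W →
      natLoop W (min (W : Int) (c.length : Int)) (n + 1) c bv j (h :: res)
        = (h + decode_binary (bv.take (W - j)) (c.drop j))
            :: natLoop W (min (W : Int) (c.length : Int)) n c (bv.drop (W - j)) 0 res := by
  intro bv
  induction bv with
  | nil =>
    intro j h res n hn hj
    simp [natLoop, db_nil_left]
  | cons bit rest ih =>
    intro j h res n hn hj
    have hdiv : j / W = 0 := Nat.div_eq_of_lt hj
    have hmod : j % W = j := Nat.mod_eq_of_lt hj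
    simp only [natLoop, hdiv, hmod, List.set_cons_zero, List.getD_cons_zero]
    rw [if_neg (by omega)]
    have hres' : (if ((j : Nat) : Int) < min (W : Int) (c.length : Int) then
          (h + bit * c.getD j 0) :: res else h :: res)
        = (if ((j : Nat) : Int) < min (W : Int) (c.length : Int) then
           h + bit * c.getD j 0 else h) :: res := by
      split_ifs <;> rfl
    rw [hres']
    set h' := if ((j : Nat) : Int) < min (W : Int) (c.length : Int) then
        h + bit * c.getD j 0 else h with hh'
    have hhead : ∀ u : List Int,
        h + decode_binary (bit :: u) (c.drop j) = h' + decode_binary u (c.drop (j + 1)) := by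
      intro u
      by_cases hc : j < c.length
      · rw [List.drop_eq_getElem_cons hc, db_cons, hh',
          if_pos (lt_min (by exact_mod_cast hj) (by exact_mod_cast hc)),
          List.getD_eq_getElem c 0 hc]
        ring
      · rw [List.drop_eq_nil_of_le (by omega), List.drop_eq_nil_of_le (by omega),
          db_nil_right, db_nil_right, hh', if_neg]
        intro hlt
        have : (j : Int) < (c.length : Int) := lt_of_lt_of_le hlt (min_le_right _ _)
        omega
    by_cases hj1 : j + 1 < W
    · rw [ih (j + 1) h' res n hn hj1]
      have htake : (bit :: rest).take (W - j) = bit :: rest.take (W - (j + 1)) := by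
        rw [show W - j = (W - (j + 1)) + 1 by omega, List.take_succ_cons]
      have hdrop : (bit :: rest).drop (W - j) = rest.drop (W - (j + 1)) := by
        rw [show W - j = (W - (j + 1)) + 1 by omega, List.drop_succ_cons]
      rw [htake, hdrop, hhead (rest.take (W - (j + 1)))]
    · have hjW : j + 1 = W := by omega
      rw [show j + 1 = W from hjW]
      rw [natLoop_shift W hW _ c rest W h' res n hn (le_refl W)]
      have htake : (bit :: rest).take (W - j) = [bit] := by
        rw [show W - j = 1 by omega]; rfl
      have hdrop : (bit :: rest).drop (W - j) = rest := by
        rw [show W - j = 1 by omega]; rfl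
      rw [htake, hdrop, show W - W = 0 by omega]
      have := hhead []
      rw [db_nil_left] at this
      rw [show h + decode_binary [bit] (List.drop j c) = h' + 0 from this]
      rw [add_zero]

theorem natLoop_main (W : Nat) (hW : 0 < W) (c : List Int) :
    ∀ (n : Nat) (bv : List Int),
      natLoop W (min (W : Int) (c.length : Int)) n c bv 0 (List.replicate n 0)
        = (List.range n).map (fun i => decode_binary ((bv.drop (i * W)).take W) c) := by
  intro n
  induction n with
  | zero => intro bv; simp [natLoop_nle]
  | succ n ih =>
    intro bv
    rw [List.replicate_succ]
    rw [natLoop_head W hW c bv 0 0 (List.replicate n 0) n (by simp) hW]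
    simp only [Nat.sub_zero, List.drop_zero, zero_add]
    rw [ih (bv.drop W), List.range_succ_eq_map, List.map_cons, List.map_map]
    congr 1
    · simp
    · apply List.map_congr_left
      intro i _
      simp only [Function.comp_apply, List.drop_drop]
      rw [show W + i * W = Nat.succ i * W by rw [Nat.succ_mul]; omega]

theorem alt_of_pos (bv : List Int) (n w : Int) (c : List Int) (hw : 0 < w) :
    decode_vector_alt bv n w c
      = (List.range n.toNat).map
          (fun i => decode_binary ((bv.drop (i * w.toNat)).take w.toNat) c) := by
  simp only [decode_vector_alt]
  rw [if_neg (by omega)]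
  have h1 : max n 0 = ((n.toNat : Nat) : Int) := by omega
  have h3 : w = ((w.toNat : Nat) : Int) := by omega
  rw [h1, h3]
  simp only [Int.toNat_natCast]
  have heq := altLoop_eq_natLoop w.toNat
    (min ((w.toNat : Nat) : Int) (c.length : Int)) n.toNat c bv 0 (List.replicate n.toNat 0)
  simp only [Nat.cast_zero] at heq
  rw [heq, natLoop_main w.toNat (by omega) c n.toNat bv]

theorem A_of_pos (bv : List Int) (n w : Int) (c : List Int) (hw : 0 < w) :
    decode_vector bv n w c
      = (List.range n.toNat).map
          (fun i => decode_binary ((bv.drop (i * w.toNat)).take w.toNat) c) := by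
  rw [A_map, PySem.List.pyRange_one]
  simp only [sub_zero, List.map_map]
  apply List.map_congr_left
  intro k _
  simp only [Function.comp_apply, zero_add]
  have hcast : ((k : Int)) * w = ((k * w.toNat : Nat) : Int) := by
    push_cast; rw [Int.toNat_of_nonneg (by omega)]
  have hcast2 : ((k : Int)) * w + w = ((k * w.toNat : Nat) : Int) + ((w.toNat : Nat) : Int) := by
    rw [hcast]; congr 1; omega
  rw [hcast2, hcast, PySem.List.slice_natCast_add]

-- ===== VERDICT (by name: the statement is the Claim_ definition above) =====
theorem decode_vector_spec : Claim_equal_decode_vector := by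
  intro bv n w c _ hpre
  unfold Spec_decode_vector
  rcases eq_or_lt_of_le hpre with hw | hw
  · -- w = 0 : every slice is empty, B short-circuits to zeros
    subst hw
    unfold decode_vector_alt
    rw [if_pos (le_refl (0 : Int)), A_map]
    have : (PySem.List.pyRange 0 n 1).map
          (fun i => decode_binary (PySem.List.slice bv (some (i * 0)) (some (i * 0 + 0))) c)
        = (PySem.List.pyRange 0 n 1).map (fun _ => (0 : Int)) := by
      apply List.map_congr_left
      intro i _
      rw [mul_zero, add_zero, PySem.List.slice_zero_start, PySem.List.slice_to bv (le_refl (0 : Int))]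
      simp [db_nil_left]
    rw [this, List.map_const', PySem.List.length_pyRange_one]
    congr 1
    omega
  · rw [A_of_pos bv n w c hw, alt_of_pos bv n w c hw]
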